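-- pv_equiv track=rewrite | github.com/Pablo-barquin/Codewars | Python/6Kyu/Zero-plentiful_Array.py | zero_plentiful
-- ===== SOURCE A (Python) =====
-- def zero_plentiful(arr):
--     if 0 not in arr:
--         return 0
--     else:
--         count = 0
--         while arr:
--             if arr[0] == 0:
--                 nums, arr = arr[:4], arr[4:]
--                 if len(nums) != 4 or any(num != 0 for num in nums):
--                     return 0
--                 else:
--                     count += 1
--                     while arr and arr[0] == 0:
--                         arr.pop(0)
--             else:
--                 arr.pop(0)
--
--         return count
-- ===== SOURCE B (Python) =====
-- def zero_plentiful(arr):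
--     count = run = 0
--     for x in arr:
--         if x == 0:
--             run += 1
--         else:
--             if 0 < run < 4:
--                 return 0
--             if run:
--                 count += 1
--             run = 0
--     if 0 < run < 4:
--         return 0
--     return count + (1 if run else 0)
-- ===== Notes on version B (the rewrite author's own statement) =====
-- stated objective: simpler
-- what changed: Replaced A's while-loop that repeatedly slices and pops the front of the list with a single linear for-pass tracking the length of the current consecutive-zero run.
import Mathlib
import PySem

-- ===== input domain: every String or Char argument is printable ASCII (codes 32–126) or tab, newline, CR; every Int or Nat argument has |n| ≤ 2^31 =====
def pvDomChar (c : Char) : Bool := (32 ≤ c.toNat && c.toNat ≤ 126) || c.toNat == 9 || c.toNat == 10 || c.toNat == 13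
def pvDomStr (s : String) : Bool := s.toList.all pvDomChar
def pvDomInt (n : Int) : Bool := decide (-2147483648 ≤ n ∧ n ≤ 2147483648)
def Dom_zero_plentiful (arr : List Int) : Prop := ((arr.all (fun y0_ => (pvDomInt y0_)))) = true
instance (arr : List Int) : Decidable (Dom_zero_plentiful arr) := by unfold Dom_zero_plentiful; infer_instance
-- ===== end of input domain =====

-- B: one linear pass tracking the current zero-run length, instead of A's front-slicing/popping loop (simpler).
-- Note: A mutates its argument (pop(0)) before rebinding; equivalence here is about the return value only.
-- ===== PORT A =====
def dropZeros : List Int → List Int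
  | [] => []
  | x :: xs => if x = 0 then dropZeros xs else x :: xs

lemma dropZeros_length_le (l : List Int) : (dropZeros l).length ≤ l.length := by
  induction l with
  | nil => simp [dropZeros]
  | cons x xs ih =>
    simp only [dropZeros]
    split
    · simp; omega
    · simp

-- the main while loop of A; arr[:4]/arr[4:] with nonnegative literal bounds are exactly take/drop
def zpLoopA (arr : List Int) (count : Int) : Int :=
  match arr with
  | [] => count
  | x :: xs =>
    if x = 0 then
      let nums := List.take 4 (x :: xs)
      let rest := List.drop 4 (x :: xs)
      if nums.length ≠ 4 ∨ nums.any (fun num => num ≠ 0) then 0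
      else zpLoopA (dropZeros rest) (count + 1)   -- inner while pops leading zeros
    else zpLoopA xs count
termination_by arr.length
decreasing_by
  · have h := dropZeros_length_le (List.drop 4 (x :: xs))
    simp at h ⊢; omega
  · simp

def zero_plentiful (arr : List Int) : Int :=
  if (0 : Int) ∈ arr then zpLoopA arr 0 else 0

-- ===== PORT B =====
def zpLoopB : List Int → Int → Int → Int
  | [], count, run => if 0 < run ∧ run < 4 then 0 else count + (if run ≠ 0 then 1 else 0)
  | x :: xs, count, run =>
    if x = 0 then zpLoopB xs count (run + 1)
    else if 0 < run ∧ run < 4 then 0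
    else zpLoopB xs (count + (if run ≠ 0 then 1 else 0)) 0

def zero_plentiful_alt (arr : List Int) : Int := zpLoopB arr 0 0

-- ===== PRECONDITION & SPEC =====
def Spec_zero_plentiful (arr : List Int) (out : Int) : Prop := out = zero_plentiful_alt arr
instance (arr : List Int) (out : Int) : Decidable (Spec_zero_plentiful arr out) := by unfold Spec_zero_plentiful; infer_instance

-- ===== CLAIM (what is proved, stated in full; the proofs are below) =====
def Claim_equal_zero_plentiful : Prop := ∀ (arr : List Int), Dom_zero_plentiful arr → Spec_zero_plentiful arr (zero_plentiful arr)

-- ===== LEMMAS AND PROOFS =====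

-- combined invariant: at a run boundary the two loops agree, and once B has seen a
-- full run (run ≥ 4) it matches A restarted after the dropped zeros with count+1
lemma zp_key : ∀ (n : Nat) (arr : List Int), arr.length ≤ n →
    (∀ count : Int, zpLoopA arr count = zpLoopB arr count 0) ∧
    (∀ (count run : Int), 4 ≤ run →
      zpLoopB arr count run = zpLoopA (dropZeros arr) (count + 1)) := by
  intro n
  induction n with
  | zero =>
    intro arr h
    have : arr = [] := List.eq_nil_of_length_eq_zero (Nat.le_zero.mp h)
    subst this
    constructor
    · intro count; simp [zpLoopA, zpLoopB]
    · intro count run h4; simp [zpLoopA, zpLoopB, dropZeros]; omega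
  | succ n ih =>
    intro arr h
    match arr with
    | [] =>
      constructor
      · intro count; simp [zpLoopA, zpLoopB]
      · intro count run h4; simp [zpLoopA, zpLoopB, dropZeros]; omega
    | x :: xs =>
      have hxs : xs.length ≤ n := by simpa using h
      constructor
      · intro count
        by_cases hx : x = 0
        · subst hx
          match xs with
          | [] => simp [zpLoopA, zpLoopB]
          | y :: ys =>
            by_cases hy : y = 0
            · subst hy
              match ys with
              | [] => simp [zpLoopA, zpLoopB]
              | z :: zs =>
                by_cases hz : z = 0
                · subst hz
                  match zs with
                  | [] => simp [zpLoopA, zpLoopB]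
                  | w :: ws =>
                    by_cases hw : w = 0
                    · subst hw
                      have hws : ws.length ≤ n := by simp at hxs; omega
                      have hB := (ih ws hws).2 count 4 (le_refl _)
                      simp [zpLoopA, zpLoopB, hB]
                    · simp [zpLoopA, zpLoopB, hw]
                · simp [zpLoopA, zpLoopB, hz]
            · simp [zpLoopA, zpLoopB, hy]
        · have hA := (ih xs hxs).1 count
          simp [zpLoopA, zpLoopB, hx, hA]
      · intro count run h4
        by_cases hx : x = 0
        · subst hx
          have hB := (ih xs hxs).2 count (run + 1) (by omega)
          simp [zpLoopB, dropZeros, hB]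
        · have hA := (ih xs hxs).1 (count + 1)
          have hrun : run ≠ 0 := by omega
          simp [zpLoopB, zpLoopA, dropZeros, hx, hrun, hA]
          omega

lemma zpLoopB_no_zero : ∀ (arr : List Int), (0 : Int) ∉ arr →
    ∀ count : Int, zpLoopB arr count 0 = count := by
  intro arr
  induction arr with
  | nil => intro _ count; simp [zpLoopB]
  | cons x xs ihx =>
    intro hmem count
    have hx : x ≠ 0 := fun hc => hmem (by simp [hc])
    have hxs : (0 : Int) ∉ xs := fun hc => hmem (List.mem_cons_of_mem _ hc)
    simp [zpLoopB, hx, ihx hxs]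

-- ===== VERDICT (by name: the statement is the Claim_ definition above) =====
theorem zero_plentiful_spec : Claim_equal_zero_plentiful := by
  intro arr _
  unfold Spec_zero_plentiful zero_plentiful zero_plentiful_alt
  by_cases hmem : (0 : Int) ∈ arr
  · simp [hmem, (zp_key arr.length arr (le_refl _)).1 0]
  · simp [hmem, zpLoopB_no_zero arr hmem 0]
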